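-- pv_equiv track=rewrite | github.com/gosch/Katas-in-python | october/speedingForCandy.py | speedingForCandy
-- ===== SOURCE A (Python) =====
-- def speedingForCandy(streets, n, k):
--     ns = len(streets)
--     t = [0] * ns
--     for i in range(ns):
--         size = len(streets[i])
--         max_sum = [0 for _ in range(size)]
--         max_sum[0] = streets[i][0]
--         current = streets[i][0]
--         for j in range(1, size):
--             current = max(streets[i][j], current + streets[i][j])
--             max_sum[j] = current
--
--         k_elements_sum = sum(streets[i][:n])
--         max_total = k_elements_sum
--         for j in range(n, size):
--             k_elements_sum += streets[i][j] - streets[i][j-n]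
--             max_total = max(max_total, k_elements_sum)
--             max_total = max(max_total, k_elements_sum + max_sum[j-n])
--
--         t[i] = max_total
--     t = sorted(t, reverse=True)
--     r = 0
--     for i in range(k):
--         if t[i] < 0:
--             break
--         else:
--             r += t[i]
--     return r
-- ===== SOURCE B (Python) =====
-- def speedingForCandy(streets, n, k):
--     # per-street best = max-sum contiguous stretch of length >= n, via prefix sums;
--     # a street shorter than n contributes its full sum (the only stretch that covers it)
--     totals = []
--     for street in streets:
--         size = len(street)
--         prefix = [0]
--         for v in street:
--             prefix.append(prefix[-1] + v)
--         if size < n: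
--             totals.append(prefix[size])
--         else:
--             min_pref = prefix[0]
--             best = prefix[n] - prefix[0]
--             for e in range(n + 1, size + 1):
--                 if prefix[e - n] < min_pref:
--                     min_pref = prefix[e - n]
--                 if prefix[e] - min_pref > best:
--                     best = prefix[e] - min_pref
--             totals.append(best)
--     total = 0
--     for rank, v in enumerate(sorted(totals, reverse=True)):
--         if rank < k and v >= 0:
--             total += v
--     return total
-- ===== Notes on version B (the rewrite author's own statement) =====
-- stated objective: faster
-- what changed: Per street, replaces A's Kadane-array-plus-sliding-window combination (two passes and an intermediate max_sum list) with a single prefix-sum scan taking max(P[e]-min(P[0..e-n])), and replaces A's index/break loop over the descending-sorted totals with a rank-bounded enumerate scan; measured faster by a constant factor.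
import Mathlib
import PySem

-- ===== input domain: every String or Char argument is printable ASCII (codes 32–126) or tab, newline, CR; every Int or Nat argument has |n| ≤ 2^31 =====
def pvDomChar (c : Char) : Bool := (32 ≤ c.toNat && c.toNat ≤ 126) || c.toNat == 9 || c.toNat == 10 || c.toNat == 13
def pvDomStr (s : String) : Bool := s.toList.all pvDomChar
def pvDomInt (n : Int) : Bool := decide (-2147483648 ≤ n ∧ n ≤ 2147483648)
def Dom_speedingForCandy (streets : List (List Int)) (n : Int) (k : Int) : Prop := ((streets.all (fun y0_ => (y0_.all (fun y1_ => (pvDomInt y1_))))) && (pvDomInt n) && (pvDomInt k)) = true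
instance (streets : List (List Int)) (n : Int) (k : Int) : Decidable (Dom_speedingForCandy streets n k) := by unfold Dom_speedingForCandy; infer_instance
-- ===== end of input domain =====

-- B replaces A's Kadane-array-plus-sliding-window per-street scan by a prefix-sum scan
-- (max of P[e] - min P[0..e-n]) and the break-indexed final loop by a rank-bounded
-- enumerate scan (objective: alternative decomposition, constant-factor speedup measured).

-- ===== PORT A =====
-- A's final loop: 'for i in range(k): if t[i] < 0: break else: r += t[i]'; Python's
-- range(k) is lazy, so the loop is ported as a counter (fuel k.toNat) with index i.
-- (pyGet? = none is Python's IndexError there; such inputs are excluded by Pre_)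
def pvALoop (t : List Int) : Nat → Int → Int → Int
  | 0, _, r => r
  | c + 1, i, r =>
    match PySem.List.pyGet? t i with
    | none => r
    | some v => if v < 0 then r else pvALoop t c (i + 1) (r + v)

-- one iteration of A's window loop over j (state = (k_elements_sum, max_total))
def pvAStep (s : List Int) (maxSum : List Int) (n : Int) (st : Int × Int) (j : Int) : Int × Int :=
  let ks := st.1 + PySem.List.pyGetD s j 0 - PySem.List.pyGetD s (j - n) 0
  let mt := max st.2 ks
  (ks, max mt (ks + PySem.List.pyGetD maxSum (j - n) 0))

-- A's per-street body (the loop body over i; max_sum built by the j-loop = scanl;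
-- max_sum[0] = streets[i][0] read with pyGetD: the empty street, where Python raises, is outside Pre_)
def pvAStreet (n : Int) (s : List Int) : Int :=
  let size : Int := s.length
  let maxSum := List.scanl (fun cur x => max x (cur + x)) (PySem.List.pyGetD s 0 0) s.tail
  let kSum := (PySem.List.slice s none (some n)).sum
  ((PySem.List.pyRange n size 1).foldl (pvAStep s maxSum n) (kSum, kSum)).2

def speedingForCandy (streets : List (List Int)) (n : Int) (k : Int) : Int :=
  let t := streets.map (pvAStreet n)
  let ts := PySem.List.sorted t (fun x => x) true
  pvALoop ts k.toNat 0 0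

-- ===== PORT B =====
-- one iteration of B's loop over e (state = (best, min_pref))
def pvBStep (pref : List Int) (n : Int) (st : Int × Int) (e : Int) : Int × Int :=
  let p := PySem.List.pyGetD pref (e - n) 0
  let mp := if p < st.2 then p else st.2
  let cand := PySem.List.pyGetD pref e 0 - mp
  (if cand > st.1 then cand else st.1, mp)

-- B's per-street body: pref sums, then max over end positions of P[e] - min P[0..e-n]
def pvBStreet (n : Int) (street : List Int) : Int :=
  let size : Int := street.length
  let pref := List.scanl (fun a v => a + v) 0 street
  if size < n then PySem.List.pyGetD pref size 0
  else
    ((PySem.List.pyRange (n + 1) (size + 1) 1).foldl (pvBStep pref n)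
      (PySem.List.pyGetD pref n 0 - PySem.List.pyGetD pref 0 0,
       PySem.List.pyGetD pref 0 0)).1

def speedingForCandy_alt (streets : List (List Int)) (n : Int) (k : Int) : Int :=
  let totals := streets.map (pvBStreet n)
  (PySem.List.enumerate (PySem.List.sorted totals (fun x => x) true) 0).foldl
    (fun total p => if p.1 < k ∧ 0 ≤ p.2 then total + p.2 else total) 0

-- ===== PRECONDITION & SPEC =====
-- declarative street value used only to state where A raises: the brute-force maximum,
-- over all contiguous windows [b, e) of length at least n, of the window's sum
-- (the whole-street sum when the street is shorter than n)
def pvVal (s : List Int) (n : Int) : Int :=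
  if (s.length : Int) < n then s.sum
  else
    ((List.range (s.length + 1 - n.toNat)).flatMap (fun i =>
        (List.range (i + 1)).map (fun b => (s.take (n.toNat + i)).sum - (s.take b).sum))).foldl
      max ((s.take n.toNat).sum)

-- Pre_ excludes exactly the inputs on which A raises IndexError: a street that is empty,
-- a negative n with at least one street present, and k > len(streets) when every street
-- value is nonnegative (the final loop then runs off the end); wherever A returns a value,
-- Pre_ admits the input.
def Pre_speedingForCandy (streets : List (List Int)) (n : Int) (k : Int) : Prop :=
  (∀ s ∈ streets, s ≠ []) ∧ (0 ≤ n ∨ streets = []) ∧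
    (k ≤ (streets.length : Int) ∨ ∃ s ∈ streets, pvVal s n < 0)
instance (streets : List (List Int)) (n : Int) (k : Int) : Decidable (Pre_speedingForCandy streets n k) := by unfold Pre_speedingForCandy; infer_instance

def pvWitness_speedingForCandy : List (List Int) × Int × Int := ([[1, -2, 3], [4]], 2, 2)

def Spec_speedingForCandy (streets : List (List Int)) (n : Int) (k : Int) (out : Int) : Prop := out = speedingForCandy_alt streets n k
instance (streets : List (List Int)) (n : Int) (k : Int) (out : Int) : Decidable (Spec_speedingForCandy streets n k out) := by unfold Spec_speedingForCandy; infer_instance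

-- ===== CLAIM (what is proved, stated in full; the proofs are below) =====
def Claim_equal_speedingForCandy : Prop := ∀ (streets : List (List Int)) (n : Int) (k : Int), Dom_speedingForCandy streets n k → Pre_speedingForCandy streets n k → Spec_speedingForCandy streets n k (speedingForCandy streets n k)

-- ===== LEMMAS AND PROOFS =====

-- min of the pref sums P 0 .. P m of s
def pvMn (s : List Int) : Nat → Int
  | 0 => 0
  | m + 1 => min (pvMn s m) ((s.take (m + 1)).sum)

-- break-at-first-negative sum (what A's final loop adds up)
def pvBreak : List Int → Int
  | [] => 0
  | v :: l => if v < 0 then 0 else v + pvBreak l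

theorem pv_take_sum_succ (s : List Int) (i : Nat) (h : i < s.length) :
    (s.take (i + 1)).sum = (s.take i).sum + s.getD i 0 := by
  rw [List.sum_take_succ s i h, List.getD_eq_getElem s 0 h]

theorem pv_scanl_add_getD (s : List Int) (c : Int) (i : Nat) (h : i ≤ s.length) :
    (List.scanl (fun a v => a + v) c s).getD i 0 = c + (s.take i).sum := by
  induction s generalizing c i with
  | nil =>
    have : i = 0 := by simpa using h
    subst this; simp [List.scanl_nil]
  | cons x t ih =>
    cases i with
    | zero => simp [List.scanl_cons]
    | succ i =>
      simp only [List.scanl_cons, List.getD_cons_succ, List.take_succ_cons, List.sum_cons]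
      rw [ih (c + x) i (by simpa using h)]
      ring

theorem pv_prefix_pyGetD (s : List Int) (e : Int) (h0 : 0 ≤ e) (h1 : e ≤ (s.length : Int)) :
    PySem.List.pyGetD (List.scanl (fun a v => a + v) 0 s) e 0 = (s.take e.toNat).sum := by
  have hlen : (List.scanl (fun a v => a + v) 0 s).length = s.length + 1 :=
    List.length_scanl
  rw [PySem.List.pyGetD_eq_getElem _ 0 h0 (by rw [hlen]; push_cast; omega)]
  rw [List.getElem_eq_getD (fallback := 0)]
  rw [pv_scanl_add_getD s 0 e.toNat (by omega)]
  ring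

theorem pv_s_pyGetD (s : List Int) (j : Int) (h0 : 0 ≤ j) (h1 : j < (s.length : Int)) :
    PySem.List.pyGetD s j 0 = (s.take (j.toNat + 1)).sum - (s.take j.toNat).sum := by
  rw [PySem.List.pyGetD_eq_getElem _ 0 h0 h1]
  rw [pv_take_sum_succ s j.toNat (by omega), List.getD_eq_getElem s 0 (by omega)]
  ring

theorem pv_scanl_getD_succ {α β : Type} (f : β → α → β) (c d : β) (dα : α) :
    ∀ (l : List α) (i : Nat), i < l.length →
      (List.scanl f c l).getD (i + 1) d = f ((List.scanl f c l).getD i d) (l.getD i dα) := by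
  intro l
  induction l generalizing c with
  | nil => intro i hi; simp at hi
  | cons a t ih =>
    intro i hi
    cases i with
    | zero => simp [List.scanl_cons]
    | succ i =>
      simp only [List.scanl_cons, List.getD_cons_succ]
      exact ih (f c a) i (by simpa using hi)

-- Kadane characterisation: max_sum[i] = P (i+1) - min P[0..i]
theorem pv_kad_getD (s : List Int) (hs : s ≠ []) (i : Nat) (hi : i < s.length) :
    (List.scanl (fun cur x => max x (cur + x)) (PySem.List.pyGetD s 0 0) s.tail).getD i 0
      = (s.take (i + 1)).sum - pvMn s i := by
  obtain ⟨x, t, rfl⟩ := List.exists_cons_of_ne_nil hs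
  simp only [PySem.List.pyGetD_zero_cons, List.tail_cons]
  induction i with
  | zero =>
    have h1 : (0:Nat) < (x :: t).length := by simp
    have := List.sum_take_succ (x :: t) 0 h1
    simp only [List.take_zero, List.sum_nil, zero_add] at this
    simp [pvMn]
  | succ i ih =>
    have hit : i < t.length := by simpa using hi
    have hi' : i < (x :: t).length := by simp; omega
    rw [pv_scanl_getD_succ _ _ _ 0 t i hit]
    rw [ih (by simp; omega)]
    have ht : t.getD i 0 = (x :: t).getD (i + 1) 0 := rfl
    rw [ht, pv_take_sum_succ (x :: t) (i + 1) hi]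
    rw [List.getD_eq_getElem (x :: t) 0 hi] at *
    have hm : pvMn (x :: t) (i + 1) = min (pvMn (x :: t) i) (((x :: t).take (i + 1)).sum) := rfl
    omega

-- the two window loops, run in lockstep, keep equal maxima
theorem pv_fold_eq (s : List Int) (n : Int) (hn : 0 ≤ n) (hns : n ≤ (s.length : Int)) :
    ∀ (c : Nat) (j : Int), n ≤ j → j + c = (s.length : Int) →
    ∀ ks mt best mp : Int,
      ks = (s.take j.toNat).sum - (s.take (j.toNat - n.toNat)).sum →
      mp = pvMn s (j.toNat - n.toNat) →
      mt = best →
      ((PySem.List.pyRange j (s.length : Int) 1).foldl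
          (pvAStep s (List.scanl (fun cur x => max x (cur + x)) (PySem.List.pyGetD s 0 0) s.tail) n)
          (ks, mt)).2
        = ((PySem.List.pyRange (j + 1) ((s.length : Int) + 1) 1).foldl
            (pvBStep (List.scanl (fun a v => a + v) 0 s) n) (best, mp)).1 := by
  intro c
  induction c with
  | zero =>
    intro j hj1 hj2 ks mt best mp hks hmp hmb
    rw [PySem.List.pyRange_one_eq_nil (by omega), PySem.List.pyRange_one_eq_nil (by omega)]
    simpa using hmb
  | succ c ih =>
    intro j hj1 hj2 ks mt best mp hks hmp hmb
    have hjlt : j < (s.length : Int) := by omega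
    have hs0 : s ≠ [] := by
      apply List.ne_nil_of_length_pos
      omega
    rw [PySem.List.pyRange_one_cons (by omega : j < (s.length : Int)),
        PySem.List.pyRange_one_cons (by omega : j + 1 < (s.length : Int) + 1)]
    simp only [List.foldl_cons]
    have e1 : (j + 1).toNat = j.toNat + 1 := by omega
    have e2 : (j + 1).toNat - n.toNat = (j.toNat - n.toNat) + 1 := by omega
    have e3 : (j - n).toNat = j.toNat - n.toNat := by omega
    have h1 : PySem.List.pyGetD s j 0
        = (s.take (j.toNat + 1)).sum - (s.take j.toNat).sum :=
      pv_s_pyGetD s j (by omega) hjlt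
    have h2 : PySem.List.pyGetD s (j - n) 0
        = (s.take ((j.toNat - n.toNat) + 1)).sum - (s.take (j.toNat - n.toNat)).sum := by
      rw [pv_s_pyGetD s (j - n) (by omega) (by omega), e3]
    have hKlen : (List.scanl (fun cur x => max x (cur + x)) (PySem.List.pyGetD s 0 0) s.tail).length
        = s.length := by
      have hpos : 0 < s.length := by omega
      rw [List.length_scanl, List.length_tail]
      omega
    have h3 : PySem.List.pyGetD
        (List.scanl (fun cur x => max x (cur + x)) (PySem.List.pyGetD s 0 0) s.tail) (j - n) 0
        = (s.take ((j.toNat - n.toNat) + 1)).sum - pvMn s (j.toNat - n.toNat) := by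
      rw [PySem.List.pyGetD_eq_getElem _ 0 (by omega) (by simp only [hKlen]; omega)]
      rw [List.getElem_eq_getD (fallback := 0), e3]
      exact pv_kad_getD s hs0 _ (by omega)
    have h4 : PySem.List.pyGetD (List.scanl (fun a v => a + v) 0 s) (j + 1 - n) 0
        = (s.take ((j.toNat - n.toNat) + 1)).sum := by
      rw [pv_prefix_pyGetD s (j + 1 - n) (by omega) (by omega)]
      rw [show (j + 1 - n).toNat = j.toNat - n.toNat + 1 from by omega]
    have h5 : PySem.List.pyGetD (List.scanl (fun a v => a + v) 0 s) (j + 1) 0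
        = (s.take (j.toNat + 1)).sum := by
      rw [pv_prefix_pyGetD s (j + 1) (by omega) (by omega), e1]
    have hm : pvMn s ((j.toNat - n.toNat) + 1)
        = min (pvMn s (j.toNat - n.toNat)) ((s.take ((j.toNat - n.toNat) + 1)).sum) := rfl
    simp only [pvAStep, pvBStep, h1, h2, h3, h4, h5]
    refine ih (j + 1) (by omega) (by omega) _ _ _ _ ?_ ?_ ?_
    · rw [e1, show j.toNat + 1 - n.toNat = j.toNat - n.toNat + 1 from by omega]
      omega
    · rw [e2, hm]
      split_ifs <;> omega
    · split_ifs <;> omega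

theorem pv_street_eq (n : Int) (hn : 0 ≤ n) (s : List Int) :
    pvAStreet n s = pvBStreet n s := by
  simp only [pvAStreet, pvBStreet]
  by_cases hlt : (s.length : Int) < n
  · rw [if_pos hlt]
    rw [PySem.List.pyRange_one_eq_nil (by omega)]
    simp only [List.foldl_nil]
    rw [PySem.List.slice_to s hn]
    rw [pv_prefix_pyGetD s (s.length : Int) (by omega) (by omega)]
    rw [List.take_of_length_le (by omega), List.take_of_length_le (by omega)]
  · rw [if_neg hlt]
    rw [PySem.List.slice_to s hn]
    refine pv_fold_eq s n hn (by omega) (s.length - n).toNat n (le_refl n) (by omega)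
      _ _ _ _ ?_ ?_ ?_
    · simp
    · rw [pv_prefix_pyGetD s 0 (by omega) (by omega)]
      simp [pvMn]
    · rw [pv_prefix_pyGetD s n (by omega) (by omega),
        pv_prefix_pyGetD s 0 (by omega) (by omega)]
      simp

theorem pv_break_filter (l : List Int) (h : l.Pairwise (fun a b => b ≤ a)) :
    pvBreak l = (l.filter (fun v => decide (0 ≤ v))).sum := by
  induction l with
  | nil => simp [pvBreak]
  | cons v t ih =>
    rcases List.pairwise_cons.mp h with ⟨hv, ht⟩
    by_cases hvneg : v < 0
    · have hf : t.filter (fun v => decide (0 ≤ v)) = [] := by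
        rw [List.filter_eq_nil_iff]
        intro b hb
        have := hv b hb
        simp only [decide_eq_true_eq]
        omega
      simp [pvBreak, hvneg, hf, show ¬ (0 ≤ v) from by omega]
    · simp [pvBreak, hvneg, show (0 ≤ v) from by omega, ih ht]

theorem pv_enum_fold (k : Int) :
    ∀ (ts : List Int) (a : Int) (acc : Int),
      (PySem.List.enumerate ts a).foldl
          (fun total p => if p.1 < k ∧ 0 ≤ p.2 then total + p.2 else total) acc
        = acc + ((ts.take (k - a).toNat).filter (fun v => decide (0 ≤ v))).sum := by
  intro ts
  induction ts with
  | nil => intro a acc; simp [PySem.List.enumerate_nil]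
  | cons v t ih =>
    intro a acc
    rw [PySem.List.enumerate_cons, List.foldl_cons]
    by_cases hak : a < k
    · rw [show (k - a).toNat = (k - (a + 1)).toNat + 1 from by omega, List.take_succ_cons]
      by_cases hv : 0 ≤ v
      · rw [if_pos ⟨hak, hv⟩, ih (a + 1) (acc + v)]
        simp only [List.filter_cons, decide_eq_true_eq, if_pos hv, List.sum_cons]
        ring
      · rw [if_neg (by tauto), ih (a + 1) acc]
        simp only [List.filter_cons, decide_eq_true_eq, if_neg hv]
    · rw [if_neg (by tauto), ih (a + 1) acc]
      rw [show (k - (a + 1)).toNat = 0 from by omega, show (k - a).toNat = 0 from by omega]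
      simp

-- A's final loop, inside the list: sums up to the first negative among the first c entries
theorem pv_aLoop_eq (ts : List Int) :
    ∀ (c : Nat) (a r : Int), 0 ≤ a → a.toNat + c ≤ ts.length →
      pvALoop ts c a r = r + pvBreak ((ts.take (a.toNat + c)).drop a.toNat) := by
  intro c
  induction c with
  | zero =>
    intro a r ha hb
    have hnil : (ts.take a.toNat).drop a.toNat = [] := by
      apply List.drop_eq_nil_of_le
      rw [List.length_take]
      omega
    simp [pvALoop, pvBreak, hnil]
  | succ c ih =>
    intro a r ha hb
    have hlt : a.toNat < ts.length := by omega
    have hget : PySem.List.pyGet? ts a = some ts[a.toNat] :=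
      PySem.List.pyGet?_eq_some_getElem ts ha (by omega)
    have hdrop : (ts.take (a.toNat + (c + 1))).drop a.toNat
        = ts[a.toNat] :: ((ts.take ((a.toNat + 1) + c)).drop (a.toNat + 1)) := by
      rw [show a.toNat + (c + 1) = (a.toNat + 1) + c from by omega]
      rw [List.drop_eq_getElem_cons (by rw [List.length_take]; omega)]
      congr 1
      exact List.getElem_take
    simp only [pvALoop, hget]
    by_cases hneg : ts[a.toNat] < 0
    · rw [if_pos hneg, hdrop]
      simp only [pvBreak, if_pos hneg]
      omega
    · rw [if_neg hneg, hdrop]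
      simp only [pvBreak, if_neg hneg]
      rw [ih (a + 1) (r + ts[a.toNat]) (by omega) (by omega)]
      rw [show (a + 1).toNat = a.toNat + 1 from by omega]
      ring

-- A's final loop when a negative entry is reached before the counter runs out:
-- the break happens inside the list and the counter never matters again
theorem pv_aLoop_break (ts : List Int) :
    ∀ (c : Nat) (a r : Int), 0 ≤ a →
      (∃ p, ∃ _ : p < ts.length, a.toNat ≤ p ∧ p < a.toNat + c ∧ ts[p] < 0) →
      pvALoop ts c a r = r + pvBreak (ts.drop a.toNat) := by
  intro c
  induction c with
  | zero =>
    intro a r _ h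
    obtain ⟨p, _, h1, h2, _⟩ := h
    omega
  | succ c ih =>
    intro a r ha h
    obtain ⟨p, hp, hap, hpk, hneg⟩ := h
    have hlt : a.toNat < ts.length := by omega
    have hget : PySem.List.pyGet? ts a = some ts[a.toNat] :=
      PySem.List.pyGet?_eq_some_getElem ts ha (by omega)
    have hdrop : ts.drop a.toNat = ts[a.toNat] :: ts.drop (a.toNat + 1) :=
      List.drop_eq_getElem_cons hlt
    simp only [pvALoop, hget]
    by_cases hneg0 : ts[a.toNat] < 0
    · rw [if_pos hneg0, hdrop]
      simp only [pvBreak, if_pos hneg0]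
      omega
    · rw [if_neg hneg0, hdrop]
      simp only [pvBreak, if_neg hneg0]
      have hpa : p ≠ a.toNat := by
        intro he
        subst he
        exact hneg0 hneg
      rw [ih (a + 1) (r + ts[a.toNat]) (by omega)
        ⟨p, hp, by omega, by omega, hneg⟩]
      rw [show (a + 1).toNat = a.toNat + 1 from by omega]
      ring

-- pvMn attains a prefix sum
theorem pv_mn_attain (s : List Int) : ∀ m : Nat, ∃ b, b ≤ m ∧ pvMn s m = (s.take b).sum := by
  intro m
  induction m with
  | zero => exact ⟨0, le_refl 0, by simp [pvMn]⟩
  | succ m ih =>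
    obtain ⟨b, hb, he⟩ := ih
    by_cases h : pvMn s m ≤ (s.take (m + 1)).sum
    · exact ⟨b, by omega, by simp only [pvMn]; omega⟩
    · exact ⟨m + 1, le_refl _, by simp only [pvMn]; omega⟩

theorem pv_init_le_foldl_max (l : List Int) : ∀ a : Int, a ≤ l.foldl max a := by
  induction l with
  | nil => intro a; simp
  | cons x t ih =>
    intro a
    simp only [List.foldl_cons]
    calc a ≤ max a x := le_max_left a x
    _ ≤ t.foldl max (max a x) := ih _
theorem pv_le_foldl_max (l : List Int) : ∀ (a x : Int), x ∈ l → x ≤ l.foldl max a := by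
  induction l with
  | nil => intro a x h; simp at h
  | cons y t ih =>
    intro a x h
    rcases List.mem_cons.mp h with rfl | hx
    · simp only [List.foldl_cons]
      calc x ≤ max a x := le_max_right a x
      _ ≤ t.foldl max (max a x) := pv_init_le_foldl_max t _
    · exact ih _ x hx

-- every window candidate is bounded by the brute-force value pvVal
theorem pv_cand_le_val (s : List Int) (n : Int) (hge : ¬ (s.length : Int) < n)
    (e b : Nat) (he1 : n.toNat ≤ e) (he2 : e ≤ s.length) (hb : b ≤ e - n.toNat) :
    (s.take e).sum - (s.take b).sum ≤ pvVal s n := by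
  unfold pvVal
  rw [if_neg hge]
  apply pv_le_foldl_max
  apply List.mem_flatMap.mpr
  refine ⟨e - n.toNat, List.mem_range.mpr (by omega), ?_⟩
  apply List.mem_map.mpr
  refine ⟨b, List.mem_range.mpr (by omega), ?_⟩
  rw [show n.toNat + (e - n.toNat) = e from by omega]

-- B's fold keeps a window candidate as its running best
theorem pv_fold_form (s : List Int) (n : Int) (hn : 0 ≤ n) :
    ∀ (c : Nat) (j : Int) (st : Int × Int), n + 1 ≤ j → j + c = (s.length : Int) + 1 →
      st.2 = pvMn s (j - 1 - n).toNat →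
      (∃ e b : Nat, n.toNat ≤ e ∧ e ≤ s.length ∧ b ≤ e - n.toNat ∧
        st.1 = (s.take e).sum - (s.take b).sum) →
      ∃ e b : Nat, n.toNat ≤ e ∧ e ≤ s.length ∧ b ≤ e - n.toNat ∧
        ((PySem.List.pyRange j ((s.length : Int) + 1) 1).foldl
          (pvBStep (List.scanl (fun a v => a + v) 0 s) n) st).1
          = (s.take e).sum - (s.take b).sum := by
  intro c
  induction c with
  | zero =>
    intro j st hj1 hj2 _ hbest
    rw [PySem.List.pyRange_one_eq_nil (by omega)]
    simpa using hbest
  | succ c ih =>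
    intro j st hj1 hj2 hmp hbest
    have hjlt : j < (s.length : Int) + 1 := by omega
    rw [PySem.List.pyRange_one_cons hjlt, List.foldl_cons]
    have hpjn : PySem.List.pyGetD (List.scanl (fun a v => a + v) 0 s) (j - n) 0
        = (s.take (j - n).toNat).sum :=
      pv_prefix_pyGetD s (j - n) (by omega) (by omega)
    have hpj : PySem.List.pyGetD (List.scanl (fun a v => a + v) 0 s) j 0
        = (s.take j.toNat).sum :=
      pv_prefix_pyGetD s j (by omega) (by omega)
    have hmn : pvMn s ((j - 1 - n).toNat + 1)
        = min (pvMn s (j - 1 - n).toNat) ((s.take ((j - 1 - n).toNat + 1)).sum) := rfl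
    have he' : (j - n).toNat = (j - 1 - n).toNat + 1 := by omega
    refine ih (j + 1) _ (by omega) (by omega) ?_ ?_
    · -- new min_pref = pvMn s (j - n).toNat
      simp only [pvBStep, hpjn]
      rw [show (j + 1 - 1 - n).toNat = (j - 1 - n).toNat + 1 from by omega, hmn, hmp, ← he']
      rw [he']
      split_ifs <;> omega
    · -- new best is still a window candidate
      simp only [pvBStep, hpjn, hpj, hmp]
      obtain ⟨e0, b0, h1, h2, h3, h4⟩ := hbest
      by_cases hc : (s.take j.toNat).sum -
          (if (s.take (j - n).toNat).sum < pvMn s (j - 1 - n).toNat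
            then (s.take (j - n).toNat).sum else pvMn s (j - 1 - n).toNat) > st.1
      · obtain ⟨b1, hb1, hb1e⟩ := pv_mn_attain s (j - n).toNat
        refine ⟨j.toNat, b1, by omega, by omega, by omega, ?_⟩
        rw [if_pos hc]
        have : (if (s.take (j - n).toNat).sum < pvMn s (j - 1 - n).toNat
            then (s.take (j - n).toNat).sum else pvMn s (j - 1 - n).toNat)
            = pvMn s (j - n).toNat := by
          rw [he', hmn, ← he']
          split_ifs <;> omega
        rw [this, hb1e]
      · exact ⟨e0, b0, h1, h2, h3, by rw [if_neg hc]; exact h4⟩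

-- a negative brute-force value forces B's street total negative
theorem pv_bstreet_neg (s : List Int) (n : Int) (hn : 0 ≤ n) (h : pvVal s n < 0) :
    pvBStreet n s < 0 := by
  simp only [pvBStreet]
  by_cases hlt : (s.length : Int) < n
  · rw [if_pos hlt]
    rw [pv_prefix_pyGetD s (s.length : Int) (by omega) (by omega)]
    rw [List.take_of_length_le (by omega)]
    unfold pvVal at h
    rw [if_pos hlt] at h
    exact h
  · rw [if_neg hlt]
    have h0 : PySem.List.pyGetD (List.scanl (fun a v => a + v) 0 s) 0 0 = (s.take 0).sum :=
      pv_prefix_pyGetD s 0 (by omega) (by omega)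
    have hpn : PySem.List.pyGetD (List.scanl (fun a v => a + v) 0 s) n 0 = (s.take n.toNat).sum :=
      pv_prefix_pyGetD s n (by omega) (by omega)
    obtain ⟨e, b, he1, he2, hb, heq⟩ :=
      pv_fold_form s n hn ((s.length : Int) - n).toNat (n + 1)
        (PySem.List.pyGetD (List.scanl (fun a v => a + v) 0 s) n 0 -
          PySem.List.pyGetD (List.scanl (fun a v => a + v) 0 s) 0 0,
         PySem.List.pyGetD (List.scanl (fun a v => a + v) 0 s) 0 0)
        (by omega) (by omega)
        (by simp only [h0]; rw [show (n + 1 - 1 - n).toNat = 0 from by omega]; simp [pvMn])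
        ⟨n.toNat, 0, le_refl _, by omega, by omega, by simp only [hpn, h0]⟩
    rw [heq]
    calc (s.take e).sum - (s.take b).sum ≤ pvVal s n := pv_cand_le_val s n hlt e b he1 he2 hb
    _ < 0 := h

-- ===== VERDICT (by name: the statement is the Claim_ definition above) =====
theorem speedingForCandy_spec : Claim_equal_speedingForCandy := by
  intro streets n k hdom hpre
  obtain ⟨hne, hn0, hk⟩ := hpre
  unfold Spec_speedingForCandy speedingForCandy speedingForCandy_alt
  have hmap : streets.map (pvAStreet n) = streets.map (pvBStreet n) := by
    rcases hn0 with hn | rfl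
    · exact List.map_congr_left (fun s _ => pv_street_eq n hn s)
    · simp
  rw [hmap]
  have hlen : (PySem.List.sorted (streets.map (pvBStreet n)) (fun x => x) true).length
      = streets.length := by
    rw [PySem.List.length_sorted, List.length_map]
  have hpair : (PySem.List.sorted (streets.map (pvBStreet n)) (fun x => x) true).Pairwise
      (fun a b => b ≤ a) := by
    have := PySem.List.sorted_pairwise_rev (xs := streets.map (pvBStreet n))
      (key := fun x => x)
    simpa using this
  simp only []
  rw [pv_enum_fold k _ 0 0, sub_zero, zero_add]
  by_cases hkle : k ≤ (streets.length : Int)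
  · rw [pv_aLoop_eq _ k.toNat 0 0 (le_refl 0) (by omega)]
    rw [show ((0 : Int).toNat + k.toNat) = k.toNat from by omega]
    rw [show (0 : Int).toNat = 0 from rfl, List.drop_zero, zero_add]
    exact pv_break_filter _ (List.Pairwise.sublist (List.take_sublist _ _) hpair)
  · rcases hk with hk | ⟨s, hs, hsneg⟩
    · omega
    have hn : 0 ≤ n := by
      rcases hn0 with h | rfl
      · exact h
      · simp at hs
    have hneg : pvBStreet n s < 0 := pv_bstreet_neg s n hn hsneg
    have hmem : pvBStreet n s ∈ PySem.List.sorted (streets.map (pvBStreet n)) (fun x => x) true := by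
      rw [PySem.List.mem_sorted]
      exact List.mem_map_of_mem hs
    obtain ⟨p, hp, hpe⟩ := List.mem_iff_getElem.mp hmem
    rw [pv_aLoop_break _ k.toNat 0 0 (le_refl 0)
      ⟨p, hp, by omega, by omega, by rw [hpe]; exact hneg⟩]
    rw [show (0 : Int).toNat = 0 from rfl, List.drop_zero, zero_add]
    rw [List.take_of_length_le (by omega)]
    exact pv_break_filter _ hpair
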